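-- pv_equiv track=rewrite | github.com/Morfingaunt/prog-iter-msa | msa.py | erase_dash
-- ===== SOURCE A (Python) =====
-- def erase_dash(aln1, aln2, max_len):
--     align1 = align2 = ""
--     pairs = list(zip(aln1, aln2))
--     while len(pairs) > max_len:
--         if ("-", "-") in pairs:
--             pairs.remove(("-", "-"))
--         else:
--             pairs.pop()
--     align1 = ''.join(list(map(lambda tup: tup[0], pairs)))
--     align2 = ''.join(list(map(lambda tup: tup[1], pairs)))
--     return align1[:max_len], align2[:max_len]
-- ===== SOURCE B (Python) =====
-- def erase_dash(aln1, aln2, max_len):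
--     excess = min(len(aln1), len(aln2)) - max_len
--     r1 = []
--     r2 = []
--     skipped = 0
--     for a, b in zip(aln1, aln2):
--         if skipped < excess and a == '-' and b == '-':
--             skipped += 1
--         else:
--             r1.append(a)
--             r2.append(b)
--     return ''.join(r1[:max_len]), ''.join(r2[:max_len])
-- ===== Notes on version B (the rewrite author's own statement) =====
-- stated objective: faster
-- what changed: Replaces the quadratic remove/pop-one-column-at-a-time while-loop with a single pass that skips the first excess gap-gap columns while copying, then trims with the same final slice.
import Mathlib
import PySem

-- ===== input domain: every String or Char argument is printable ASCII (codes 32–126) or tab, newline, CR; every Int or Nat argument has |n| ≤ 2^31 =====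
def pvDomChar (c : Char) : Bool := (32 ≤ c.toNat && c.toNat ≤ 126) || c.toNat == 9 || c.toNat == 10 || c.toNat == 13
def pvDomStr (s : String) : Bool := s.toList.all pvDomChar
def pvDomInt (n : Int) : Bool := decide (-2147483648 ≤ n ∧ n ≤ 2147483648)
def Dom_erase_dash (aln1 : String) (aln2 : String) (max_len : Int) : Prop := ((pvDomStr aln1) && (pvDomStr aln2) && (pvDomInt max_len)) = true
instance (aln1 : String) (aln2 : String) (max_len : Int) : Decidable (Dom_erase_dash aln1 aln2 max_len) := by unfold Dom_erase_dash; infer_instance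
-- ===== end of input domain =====

-- B replaces A's quadratic remove/pop while-loop with one linear pass (skip first
-- `excess` gap-gap columns, then the same final slice); objective: faster (asymptotic).

-- ===== PORT A =====
-- the `while len(pairs) > max_len` loop; fuel bounds the iterations (each one shortens
-- `pairs` by 1, so `pairs.length` fuel is enough whenever the Python loop terminates);
-- the `none` branches of remove?/pop? are unreachable (membership was just checked /
-- Python's IndexError on pop from [], excluded by Pre_)
def pvEraseLoop : Nat → List (Char × Char) → Int → List (Char × Char)
  | 0, pairs, _ => pairs
  | fuel + 1, pairs, max_len =>
    if (pairs.length : Int) > max_len then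
      if ('-', '-') ∈ pairs then
        match PySem.List.remove? pairs ('-', '-') with
        | some p => pvEraseLoop fuel p max_len
        | none => pairs
      else
        match PySem.List.pop? pairs with
        | some (_, p) => pvEraseLoop fuel p max_len
        | none => pairs
    else pairs

def erase_dash (aln1 : String) (aln2 : String) (max_len : Int) : String × String :=
  let pairs := aln1.toList.zip aln2.toList
  let res := pvEraseLoop pairs.length pairs max_len
  let align1 := res.map (fun tup => tup.1)
  let align2 := res.map (fun tup => tup.2)
  (String.ofList (PySem.List.slice align1 none (some max_len)),
   String.ofList (PySem.List.slice align2 none (some max_len)))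

-- ===== PORT B =====
-- Source B's single for-loop: skip a gap-gap column while skipped < excess, else keep it
def pvAltGo (excess : Int) (skipped : Int) : List (Char × Char) → List Char × List Char
  | [] => ([], [])
  | (a, b) :: rest =>
    if skipped < excess ∧ a = '-' ∧ b = '-' then pvAltGo excess (skipped + 1) rest
    else
      let r := pvAltGo excess skipped rest
      (a :: r.1, b :: r.2)

def erase_dash_alt (aln1 : String) (aln2 : String) (max_len : Int) : String × String :=
  let excess := (min aln1.toList.length aln2.toList.length : Int) - max_len
  let r := pvAltGo excess 0 (aln1.toList.zip aln2.toList)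
  (String.ofList (PySem.List.slice r.1 none (some max_len)),
   String.ofList (PySem.List.slice r.2 none (some max_len)))

-- ===== PRECONDITION & SPEC =====
-- For max_len < 0 the while-loop empties `pairs` and then `pairs.pop()` raises
-- IndexError, so A only returns for max_len ≥ 0.
def Pre_erase_dash (aln1 : String) (aln2 : String) (max_len : Int) : Prop := 0 ≤ max_len
instance (aln1 : String) (aln2 : String) (max_len : Int) : Decidable (Pre_erase_dash aln1 aln2 max_len) := by unfold Pre_erase_dash; infer_instance
def pvWitness_erase_dash : String × String × Int := ("a--b", "ac-d", 2)

def Spec_erase_dash (aln1 : String) (aln2 : String) (max_len : Int) (out : String × String) : Prop := out = erase_dash_alt aln1 aln2 max_len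
instance (aln1 : String) (aln2 : String) (max_len : Int) (out : String × String) : Decidable (Spec_erase_dash aln1 aln2 max_len out) := by unfold Spec_erase_dash; infer_instance

-- ===== CLAIM (what is proved, stated in full; the proofs are below) =====
def Claim_equal_erase_dash : Prop := ∀ (aln1 : String) (aln2 : String) (max_len : Int), Dom_erase_dash aln1 aln2 max_len → Pre_erase_dash aln1 aln2 max_len → Spec_erase_dash aln1 aln2 max_len (erase_dash aln1 aln2 max_len)

-- ===== LEMMAS AND PROOFS =====

-- reference: drop the first (up to) k gap-gap columns
def pvSkipGG (k : Int) : List (Char × Char) → List (Char × Char)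
  | [] => []
  | p :: rest => if 0 < k ∧ p = ('-', '-') then pvSkipGG (k - 1) rest else p :: pvSkipGG k rest

theorem pvSkipGG_nonpos (k : Int) (hk : k ≤ 0) (l : List (Char × Char)) : pvSkipGG k l = l := by
  induction l with
  | nil => rfl
  | cons p rest ih => simp [pvSkipGG, ih]; omega

theorem pvSkipGG_not_mem (k : Int) (l : List (Char × Char)) (h : ('-', '-') ∉ l) : pvSkipGG k l = l := by
  induction l with
  | nil => rfl
  | cons p rest ih =>
    simp only [List.mem_cons, not_or] at h
    simp [pvSkipGG, Ne.symm h.1, ih h.2]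

theorem pvSkipGG_erase (k : Int) (hk : 0 < k) (l : List (Char × Char)) (h : ('-', '-') ∈ l) :
    pvSkipGG k l = pvSkipGG (k - 1) (l.erase ('-', '-')) := by
  induction l with
  | nil => cases h
  | cons p rest ih =>
    by_cases hp : p = ('-', '-')
    · subst hp; simp [pvSkipGG, hk, List.erase_cons_head]
    · have hmem : ('-', '-') ∈ rest := by
        cases List.mem_cons.mp h with
        | inl h' => exact absurd h'.symm hp
        | inr h' => exact h'
      rw [List.erase_cons_tail (by simpa using hp)]
      simp [pvSkipGG, hp, ih hmem]

theorem pvAltGo_eq (l : List (Char × Char)) : ∀ (excess skipped : Int),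
    pvAltGo excess skipped l =
      ((pvSkipGG (excess - skipped) l).map Prod.fst, (pvSkipGG (excess - skipped) l).map Prod.snd) := by
  induction l with
  | nil => intro excess skipped; rfl
  | cons p rest ih =>
    intro excess skipped
    obtain ⟨a, b⟩ := p
    by_cases hc : skipped < excess ∧ a = '-' ∧ b = '-'
    · simp [pvAltGo, hc, pvSkipGG, show excess - skipped = (excess - (skipped + 1)) + 1 by ring, ih]
    · have hcond : ¬ ((0 : Int) < excess - skipped ∧ ((a, b) : Char × Char) = ('-', '-')) := by
        intro ⟨h1, h2⟩
        exact hc ⟨by omega, by simpa using h2⟩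
      simp only [pvAltGo, pvSkipGG, if_neg hc, if_neg hcond, ih, List.map_cons]

theorem pvEraseLoop_eq (max_len : Int) (hml : 0 ≤ max_len) :
    ∀ (fuel : Nat) (pairs : List (Char × Char)), pairs.length ≤ fuel →
      pvEraseLoop fuel pairs max_len =
        (pvSkipGG ((pairs.length : Int) - max_len) pairs).take max_len.toNat := by
  intro fuel
  induction fuel with
  | zero =>
    intro pairs hlen
    have : pairs = [] := List.eq_nil_of_length_eq_zero (Nat.le_zero.mp hlen)
    subst this; simp [pvEraseLoop, pvSkipGG]
  | succ fuel ih =>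
    intro pairs hlen
    by_cases hgt : (pairs.length : Int) > max_len
    · by_cases hmem : ('-', '-') ∈ pairs
      · have hrem := PySem.List.remove?_eq_some_erase pairs ('-', '-') hmem
        have hne : pairs ≠ [] := by intro h; subst h; cases hmem
        have hlenE : (pairs.erase ('-', '-')).length = pairs.length - 1 :=
          List.length_erase_of_mem hmem
        have hpos : 1 ≤ pairs.length := List.length_pos_iff.mpr hne
        rw [pvEraseLoop, if_pos hgt, if_pos hmem, hrem]
        show pvEraseLoop fuel (pairs.erase ('-', '-')) max_len = _
        rw [ih (pairs.erase ('-', '-')) (by omega)]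
        rw [pvSkipGG_erase _ (by omega) _ hmem]
        congr 1
        congr 1
        rw [hlenE]
        omega
      · have hne : pairs ≠ [] := by
          intro h; subst h; simp at hgt; omega
        have hrepr := List.dropLast_concat_getLast hne
        have hpop : PySem.List.pop? pairs = some (pairs.getLast hne, pairs.dropLast) := by
          conv_lhs => rw [← hrepr]
          exact PySem.List.pop?_last _ _
        rw [pvEraseLoop, if_pos hgt, if_neg hmem, hpop]
        have hlenD : pairs.dropLast.length = pairs.length - 1 := List.length_dropLast
        have hpos : 1 ≤ pairs.length := List.length_pos_iff.mpr hne
        show pvEraseLoop fuel pairs.dropLast max_len = _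
        rw [ih pairs.dropLast (by omega)]
        have hnm' : ('-', '-') ∉ pairs.dropLast := fun hm =>
          hmem (List.mem_of_mem_dropLast hm)
        rw [pvSkipGG_not_mem _ _ hnm', pvSkipGG_not_mem _ _ hmem]
        rw [List.dropLast_eq_take, List.take_take]
        congr 1
        omega
    · rw [pvEraseLoop, if_neg hgt]
      rw [pvSkipGG_nonpos _ (by omega)]
      rw [List.take_of_length_le (by omega)]

-- ===== VERDICT (by name: the statement is the Claim_ definition above) =====
theorem erase_dash_spec : Claim_equal_erase_dash := by
  unfold Claim_equal_erase_dash
  intro aln1 aln2 max_len _ hpre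
  unfold Spec_erase_dash erase_dash erase_dash_alt
  dsimp only
  have hpre' : (0 : Int) ≤ max_len := hpre
  have hzlen : (aln1.toList.zip aln2.toList).length = min aln1.toList.length aln2.toList.length :=
    List.length_zip
  rw [pvEraseLoop_eq max_len hpre' _ _ le_rfl, pvAltGo_eq]
  have harg : min (aln1.toList.length : Int) (aln2.toList.length : Int) - max_len - 0 =
      ((aln1.toList.zip aln2.toList).length : Int) - max_len := by
    rw [hzlen]; push_cast; ring
  rw [harg]
  rw [PySem.List.slice_to _ hpre', PySem.List.slice_to _ hpre',
      PySem.List.slice_to _ hpre', PySem.List.slice_to _ hpre']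
  simp [← List.map_take, List.take_take]
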